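-- pv_equiv track=rewrite | github.com/jinzhao3611/UMR_Release_2_0 | scripts/format_english_1_0.py | align_rows
-- ===== SOURCE A (Python) =====
-- def align_rows(rows):
--     """
--     Given a list of rows, each row a list of strings, compute the max width
--     of each column and pad so columns are aligned.
--     Returns a list of joined strings (one per row).
--     """
--     if not rows:
--         return []
--     # Number of columns in the widest row
--     max_cols = max(len(r) for r in rows)
--
--     # Compute max width of each column
--     col_widths = [0] * max_cols
--     for r in rows:
--         for c, cell in enumerate(r):
--             col_widths[c] = max(col_widths[c], len(cell))
--
--     # Build each row as a padded string
--     aligned = []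
--     for r in rows:
--         padded_cells = []
--         for c in range(max_cols):
--             cell = r[c] if c < len(r) else ""
--             # left-justify to col_widths[c]
--             padded_cells.append(cell.ljust(col_widths[c]))
--         # Join with a single space (or tab if you prefer)
--         aligned.append(" ".join(padded_cells))
--     return aligned
-- ===== SOURCE B (Python) =====
-- def _pad_column(col):
--     width = max(map(len, col))
--     return [cell.ljust(width) for cell in col]
--
--
-- def align_rows(rows):
--     """Column-major reimplementation: transpose into columns, pad each
--     column to its max width, then zip the padded columns back into rows."""
--     if not rows:
--         return []
--     max_cols = max(map(len, rows))
--     if max_cols == 0: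
--         return [""] * len(rows)
--     columns = [[r[c] if c < len(r) else "" for r in rows] for c in range(max_cols)]
--     padded = [_pad_column(col) for col in columns]
--     return [" ".join(cells) for cells in zip(*padded)]
-- ===== Notes on version B (the rewrite author's own statement) =====
-- stated objective: alternative
-- what changed: B works column-major: it transposes the table into explicit columns, computes each column's width and pads that whole column at once, then zips the padded columns back into rows, instead of A's row-major passes that accumulate widths in a mutated list and re-index each row cell by cell.
import Mathlib
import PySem

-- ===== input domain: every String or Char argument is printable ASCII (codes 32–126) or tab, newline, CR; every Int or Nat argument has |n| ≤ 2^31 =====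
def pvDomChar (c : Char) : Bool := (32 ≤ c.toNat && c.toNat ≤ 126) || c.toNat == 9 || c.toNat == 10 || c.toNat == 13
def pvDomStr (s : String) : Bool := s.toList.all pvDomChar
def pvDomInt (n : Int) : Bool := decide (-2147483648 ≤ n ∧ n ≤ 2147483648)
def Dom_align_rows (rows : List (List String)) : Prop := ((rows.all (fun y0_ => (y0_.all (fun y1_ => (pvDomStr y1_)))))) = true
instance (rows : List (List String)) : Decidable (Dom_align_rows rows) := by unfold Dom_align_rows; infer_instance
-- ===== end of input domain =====

-- B is an alternative, column-major formulation (transpose, pad columns, zip back); return value proved equal to A's on all inputs.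

-- shared primitives (both Pythons use len, str.ljust, " ".join and `r[c] if c < len(r) else ""`)
def strLen (s : String) : Nat := s.toList.length
def pyLjust (s : String) (w : Nat) : String := String.mk (s.toList ++ List.replicate (w - s.toList.length) ' ')
def joinSpace (cells : List String) : String := PySem.Str.join " " cells
def cellAt (r : List String) (c : Nat) : String := if c < r.length then r.getD c "" else ""
-- max(len(r) for r in rows): exact for nonempty rows since lengths are ≥ 0
def maxColsOf (rows : List (List String)) : Nat := rows.foldl (fun m r => max m r.length) 0

-- ===== PORT A =====
-- inner `for c, cell in enumerate(r): col_widths[c] = max(col_widths[c], len(cell))`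
-- (index c from enumerate is a nonnegative in-range list index, carried as Nat)
def updWidths (ws : List Nat) (r : List String) : List Nat :=
  r.zipIdx.foldl (fun ws ci => ws.set ci.2 (max (ws.getD ci.2 0) (strLen ci.1))) ws

def align_rows (rows : List (List String)) : List String :=
  if rows = [] then []
  else
    let m := maxColsOf rows
    let ws := rows.foldl updWidths (List.replicate m 0)
    rows.map (fun r => joinSpace ((List.range m).map (fun c => pyLjust (cellAt r c) (ws.getD c 0))))

-- ===== PORT B =====
def colMax (col : List String) : Nat := (col.map strLen).foldl max 0
def padColumn (col : List String) : List String :=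
  let width := colMax col
  col.map (fun cell => pyLjust cell width)

-- zip(*padded): rows of the columns, stopping at the shortest (here all columns have equal length)
def sum_tail_lt (ls : List (List String)) (h1 : ls ≠ []) (h2 : ∀ l ∈ ls, l ≠ []) :
    ((ls.map List.tail).map List.length).sum < (ls.map List.length).sum := by
  induction ls with
  | nil => exact absurd rfl h1
  | cons a as ih =>
    have ha : a ≠ [] := h2 a (by simp)
    have h1' : a.tail.length < a.length := by
      cases a with
      | nil => exact absurd rfl ha
      | cons x xs => simp
    have h2' : ((as.map List.tail).map List.length).sum ≤ (as.map List.length).sum := by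
      simp only [List.map_map]
      apply List.sum_le_sum
      intro l _
      simp [List.length_tail]
    simp only [List.map_cons, List.sum_cons]
    omega

def zipStar (ls : List (List String)) : List (List String) :=
  if h : ls = [] ∨ ls.any List.isEmpty then []
  else (ls.map (fun l => l.headD "")) :: zipStar (ls.map List.tail)
termination_by (ls.map List.length).sum
decreasing_by
  rcases not_or.mp h with ⟨h1, h2⟩
  have h2' : ∀ l ∈ ls, l ≠ [] := by
    intro l hl
    simp only [List.any_eq_true, not_exists, not_and] at h2
    simpa [List.isEmpty_iff] using h2 l hl
  have key := sum_tail_lt ls h1 h2'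
  simpa using key

def align_rows_alt (rows : List (List String)) : List String :=
  if rows = [] then []
  else
    let m := maxColsOf rows
    if m = 0 then rows.map (fun _ => "")
    else
      let columns := (List.range m).map (fun c => rows.map (fun r => cellAt r c))
      let padded := columns.map padColumn
      (zipStar padded).map (fun cells => joinSpace cells)

-- ===== PRECONDITION & SPEC =====
def Spec_align_rows (rows : List (List String)) (out : List String) : Prop := out = align_rows_alt rows
instance (rows : List (List String)) (out : List String) : Decidable (Spec_align_rows rows out) := by unfold Spec_align_rows; infer_instance

-- ===== CLAIM (what is proved, stated in full; the proofs are below) =====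
def Claim_equal_align_rows : Prop := ∀ (rows : List (List String)), Dom_align_rows rows → Spec_align_rows rows (align_rows rows)

-- ===== LEMMAS AND PROOFS =====

theorem cellAt_eq_getD (r : List String) (c : Nat) : cellAt r c = r.getD c "" := by
  unfold cellAt
  split
  · rfl
  · rename_i h
    rw [List.getD_eq_getElem?_getD, List.getElem?_eq_none (by omega)]
    rfl

theorem cellAt_of_ge (r : List String) (c : Nat) (h : r.length ≤ c) : cellAt r c = "" := by
  simp [cellAt, Nat.not_lt.mpr h]

-- characterization of one pass of A's width-update loop (generalized over the enumerate start index)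
theorem updGo_spec (r : List String) (k : Nat) (ws : List Nat) (hk : k + r.length ≤ ws.length) :
    ((r.zipIdx k).foldl (fun ws ci => ws.set ci.2 (max (ws.getD ci.2 0) (strLen ci.1))) ws).length = ws.length ∧
    ∀ c, ((r.zipIdx k).foldl (fun ws ci => ws.set ci.2 (max (ws.getD ci.2 0) (strLen ci.1))) ws).getD c 0 =
      if k ≤ c ∧ c < k + r.length then max (ws.getD c 0) (strLen (r.getD (c - k) "")) else ws.getD c 0 := by
  induction r generalizing k ws with
  | nil => simp [List.zipIdx]
  | cons x xs ih =>
    simp only [List.zipIdx_cons, List.foldl_cons]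
    set ws' := ws.set k (max (ws.getD k 0) (strLen x)) with hws'
    have hlen' : ws'.length = ws.length := by simp [hws']
    have hk' : (k + 1) + xs.length ≤ ws'.length := by
      rw [hlen']; simp only [List.length_cons] at hk; omega
    obtain ⟨ihl, ihe⟩ := ih (k + 1) ws' hk'
    constructor
    · rw [ihl, hlen']
    · intro c
      rw [ihe c]
      have hkw : k < ws.length := by simp only [List.length_cons] at hk; omega
      have hset : ∀ j, ws'.getD j 0 = if j = k then max (ws.getD j 0) (strLen x) else ws.getD j 0 := by
        intro j
        rw [hws', List.getD_eq_getElem?_getD, List.getElem?_set]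
        by_cases hj : k = j
        · subst hj; simp [hkw, List.getD_eq_getElem?_getD]
        · simp [hj, Ne.symm hj, List.getD_eq_getElem?_getD]
      by_cases h1 : (k + 1) ≤ c ∧ c < (k + 1) + xs.length
      · have hck : ¬ c = k := by omega
        have hfull : k ≤ c ∧ c < k + (x :: xs).length := by
          simp only [List.length_cons]; omega
        rw [if_pos h1, hset c, if_neg hck, if_pos hfull]
        have hck1 : c - k = (c - (k + 1)) + 1 := by omega
        rw [hck1, List.getD_cons_succ]
      · rw [if_neg h1, hset c]
        by_cases hc : c = k
        · have hfull : k ≤ c ∧ c < k + (x :: xs).length := by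
            simp only [List.length_cons]; omega
          rw [if_pos hc, if_pos hfull, hc, Nat.sub_self, List.getD_cons_zero]
        · have hcond : ¬ (k ≤ c ∧ c < k + (x :: xs).length) := by
            simp only [List.length_cons]; omega
          rw [if_neg hc, if_neg hcond]

theorem updWidths_spec (r : List String) (ws : List Nat) (hr : r.length ≤ ws.length) :
    (updWidths ws r).length = ws.length ∧
    ∀ c, (updWidths ws r).getD c 0 = max (ws.getD c 0) (strLen (cellAt r c)) := by
  obtain ⟨hl, he⟩ := updGo_spec r 0 ws (by omega)
  refine ⟨hl, fun c => ?_⟩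
  unfold updWidths
  rw [he c]
  by_cases hc : c < r.length
  · simp only [Nat.zero_le, hc, Nat.zero_add, and_true, if_true, Nat.sub_zero]
    rw [cellAt_eq_getD]
  · have : ¬ (0 ≤ c ∧ c < 0 + r.length) := by omega
    simp only [this, if_false]
    rw [cellAt_of_ge r c (by omega), strLen]
    simp

theorem widthsFold_spec (rows : List (List String)) (ws : List Nat)
    (h : ∀ r ∈ rows, r.length ≤ ws.length) :
    (rows.foldl updWidths ws).length = ws.length ∧
    ∀ c, (rows.foldl updWidths ws).getD c 0 =
      rows.foldl (fun a r => max a (strLen (cellAt r c))) (ws.getD c 0) := by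
  induction rows generalizing ws with
  | nil => simp
  | cons r rs ih =>
    have hr : r.length ≤ ws.length := h r (by simp)
    obtain ⟨hl1, he1⟩ := updWidths_spec r ws hr
    have h' : ∀ r' ∈ rs, r'.length ≤ (updWidths ws r).length := by
      intro r' hr'; rw [hl1]; exact h r' (by simp [hr'])
    obtain ⟨hl2, he2⟩ := ih (updWidths ws r) h'
    refine ⟨by simp only [List.foldl_cons]; rw [hl2, hl1], fun c => ?_⟩
    simp only [List.foldl_cons]
    rw [he2 c, he1 c]

theorem le_maxColsOf (rows : List (List String)) : ∀ r ∈ rows, r.length ≤ maxColsOf rows := by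
  have gen : ∀ (l : List (List String)) (init : Nat),
      init ≤ l.foldl (fun m r => max m r.length) init ∧
      ∀ r ∈ l, r.length ≤ l.foldl (fun m r => max m r.length) init := by
    intro l
    induction l with
    | nil => simp
    | cons a as ih =>
      intro init
      obtain ⟨h1, h2⟩ := ih (max init a.length)
      refine ⟨le_trans (le_max_left _ _) h1, ?_⟩
      intro r hr
      simp only [List.foldl_cons]
      rcases List.mem_cons.mp hr with hr | hr
      · subst hr; exact le_trans (le_max_right _ _) h1
      · exact h2 r hr
  exact (gen rows 0).2

theorem colMax_eq_fold (rows : List (List String)) (c : Nat) :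
    colMax (rows.map (fun r => cellAt r c)) =
      rows.foldl (fun a r => max a (strLen (cellAt r c))) 0 := by
  unfold colMax
  rw [List.map_map, List.foldl_map]
  rfl

theorem zipStar_rect (rs : List (List String)) (m : Nat) (g : Nat → List String → String)
    (hm : 0 < m) :
    zipStar ((List.range m).map (fun c => rs.map (g c))) =
      rs.map (fun r => (List.range m).map (fun c => g c r)) := by
  induction rs with
  | nil =>
    rw [zipStar.eq_def]
    have hmem : ([] : List String) ∈ (List.range m).map (fun c => (List.map (g c) [])) :=
      List.mem_map.mpr ⟨0, List.mem_range.mpr hm, by simp⟩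
    have : ((List.range m).map (fun c => (List.map (g c) []))).any List.isEmpty = true := by
      simp only [List.any_eq_true]
      exact ⟨[], hmem, by simp⟩
    simp [this]
  | cons r rs' ih =>
    rw [zipStar.eq_def]
    have hne : (List.range m).map (fun c => (r :: rs').map (g c)) ≠ [] := by
      simp [List.map_eq_nil_iff, List.range_eq_nil]; omega
    have hany : ((List.range m).map (fun c => (r :: rs').map (g c))).any List.isEmpty = false := by
      simp [List.any_eq_false]
    rw [dif_neg (by simp; omega)]
    congr 1
    · rw [List.map_map]; rfl
    · rw [List.map_map]
      have : ((fun l => l.tail) ∘ fun c => (r :: rs').map (g c)) = fun c => rs'.map (g c) := by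
        funext c; simp
      rw [this, ih]

theorem joinSpace_nil : joinSpace [] = "" := by decide

-- ===== VERDICT (by name: the statement is the Claim_ definition above) =====
theorem align_rows_spec : Claim_equal_align_rows := by
  intro rows _
  unfold Spec_align_rows align_rows align_rows_alt
  by_cases hnil : rows = []
  · simp [hnil]
  · rw [if_neg hnil, if_neg hnil]
    dsimp only
    by_cases hm : maxColsOf rows = 0
    · rw [if_pos hm, hm]
      simp [joinSpace_nil]
    · rw [if_neg hm]
      have hm' : 0 < maxColsOf rows := Nat.pos_of_ne_zero hm
      set m := maxColsOf rows with hmdef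
      -- B side: rewrite padded columns into the rectangular map form and zip back
      have hpad : ((List.range m).map (fun c => rows.map (fun r => cellAt r c))).map padColumn =
          (List.range m).map (fun c => rows.map (fun r =>
            pyLjust (cellAt r c) (colMax (rows.map (fun r' => cellAt r' c))))) := by
        rw [List.map_map]
        apply List.map_congr_left
        intro c _
        simp only [Function.comp, padColumn, List.map_map]
        rfl
      rw [hpad, zipStar_rect rows m _ hm', List.map_map]
      -- A side: the computed widths equal the per-column maxima
      have hbound : ∀ r ∈ rows, r.length ≤ (List.replicate m 0 : List Nat).length := by
        intro r hr; rw [List.length_replicate]; exact le_maxColsOf rows r hr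
      obtain ⟨_, he⟩ := widthsFold_spec rows (List.replicate m 0) hbound
      apply List.map_congr_left
      intro r _
      simp only [Function.comp]
      congr 1
      apply List.map_congr_left
      intro c _
      congr 1
      rw [he c, colMax_eq_fold]
      congr 1
      rw [List.getD_eq_getElem?_getD]
      by_cases hc : c < m
      · simp [hc]
      · have : (List.replicate m (0 : Nat))[c]? = none := by
          apply List.getElem?_eq_none
          simpa using Nat.le_of_not_lt hc
        simp [this]
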